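-- pv_equiv track=rewrite | github.com/mbits-libs/coveralls | cov/excludes.py | _clean_functions
-- ===== SOURCE A (Python) =====
-- def _clean_functions(lines: dict[int, int], functions: dict[str, dict]):
--     cleaned: dict[str, dict] = {}
--     counter = 0
--     fn_set = {line + 1 for line, _ in []}
--     for key, fn in functions.items():
--         start_line = fn.get("start_line", 0)
--         end_line = fn.get("end_line", start_line)
--         excluded = True
--         for line in range(start_line, end_line + 1):
--             if line in lines and line not in fn_set:
--                 excluded = False
--                 break
--         if not excluded:
--             cleaned[key] = fn
--         else:
--             counter += 1
--     return cleaned, counter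
-- ===== SOURCE B (Python) =====
-- def _clean_functions(lines: dict[int, int], functions: dict[str, dict]):
--     keys = sorted(lines)
--     n = len(keys)
--     cleaned: dict[str, dict] = {}
--     counter = 0
--     for key, fn in functions.items():
--         start_line = fn.get("start_line", 0)
--         end_line = fn.get("end_line", start_line)
--         # leftmost counted line >= start_line (hand-written bisect_left)
--         lo, hi = 0, n
--         while lo < hi:
--             mid = (lo + hi) // 2
--             if keys[mid] < start_line:
--                 lo = mid + 1
--             else:
--                 hi = mid
--         if lo < n and keys[lo] <= end_line:
--             cleaned[key] = fn
--         else: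
--             counter += 1
--     return cleaned, counter
-- ===== Notes on version B (the rewrite author's own statement) =====
-- stated objective: alternative
-- what changed: Instead of scanning every line number in each function's [start_line, end_line] range and testing dict membership per line, B sorts the counted-line keys once and answers each function with a hand-written binary search for the leftmost key >= start_line; it trades A's O(span) range walk per function for an O(log L) search after an O(L log L) sort.
import Mathlib
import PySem

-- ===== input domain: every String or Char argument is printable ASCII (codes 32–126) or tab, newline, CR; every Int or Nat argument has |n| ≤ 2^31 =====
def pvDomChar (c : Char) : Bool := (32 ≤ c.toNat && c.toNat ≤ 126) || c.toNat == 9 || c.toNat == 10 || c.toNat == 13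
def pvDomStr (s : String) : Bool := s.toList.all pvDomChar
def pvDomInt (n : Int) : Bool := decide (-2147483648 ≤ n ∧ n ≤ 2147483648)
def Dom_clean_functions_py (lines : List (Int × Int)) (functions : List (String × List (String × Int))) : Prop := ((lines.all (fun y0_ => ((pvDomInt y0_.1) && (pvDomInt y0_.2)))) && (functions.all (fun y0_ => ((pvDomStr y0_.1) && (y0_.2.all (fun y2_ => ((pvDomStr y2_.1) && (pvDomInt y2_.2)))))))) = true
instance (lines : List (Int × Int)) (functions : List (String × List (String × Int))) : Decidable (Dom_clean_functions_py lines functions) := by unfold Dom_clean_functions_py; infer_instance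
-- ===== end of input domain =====

-- B replaces A's per-function scan of the whole line-number range (membership test per line)
-- by one sort of the counted-line keys plus a hand-written binary search per function; return value only, no mutation.

-- ===== PORT A =====
-- one iteration of A's `for key, fn in functions.items()` loop
def pvAStep (lines : List (Int × Int)) (st : PySem.Dict String (List (String × Int)) × Int)
    (kv : String × List (String × Int)) : PySem.Dict String (List (String × Int)) × Int :=
  let fn := kv.2
  let start_line := PySem.Dict.getD (PySem.Dict.mk fn) "start_line" 0
  let end_line := PySem.Dict.getD (PySem.Dict.mk fn) "end_line" start_line
  let fn_set : PySem.Set Int := PySem.Set.ofList (([] : List (Int × Int)).map (fun p => p.1 + 1))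
  -- `excluded` loop with break = any over range(start_line, end_line+1)
  let excluded := ! ((PySem.List.pyRange start_line (end_line + 1) 1).any
      (fun line => (lines.any (fun p => p.1 == line)) && ! (PySem.Set.contains fn_set line)))
  if !excluded then (st.1.insert kv.1 fn, st.2) else (st.1, st.2 + 1)

def clean_functions_py (lines : List (Int × Int)) (functions : List (String × List (String × Int))) : (List (String × List (String × Int))) × Int :=
  let st := functions.foldl (pvAStep lines) (PySem.Dict.empty, 0)
  (st.1.items, st.2)

-- ===== PORT B =====
-- hand-written bisect_left while-loop from Source B (keys[mid] is in range whenever lo < hi ≤ len)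
def pvBisect (keys : List Int) (x : Int) (lo hi : Nat) : Nat :=
  if lo < hi then
    let mid := (lo + hi) / 2
    if keys.getD mid 0 < x then pvBisect keys x (mid + 1) hi
    else pvBisect keys x lo mid
  else lo
termination_by hi - lo
decreasing_by all_goals omega

-- one iteration of B's loop
def pvBStep (keys : List Int) (st : PySem.Dict String (List (String × Int)) × Int)
    (kv : String × List (String × Int)) : PySem.Dict String (List (String × Int)) × Int :=
  let fn := kv.2
  let start_line := PySem.Dict.getD (PySem.Dict.mk fn) "start_line" 0
  let end_line := PySem.Dict.getD (PySem.Dict.mk fn) "end_line" start_line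
  let lo := pvBisect keys start_line 0 keys.length
  if (decide (lo < keys.length)) && (decide (keys.getD lo 0 ≤ end_line)) then
    (st.1.insert kv.1 fn, st.2)
  else (st.1, st.2 + 1)

def clean_functions_py_alt (lines : List (Int × Int)) (functions : List (String × List (String × Int))) : (List (String × List (String × Int))) × Int :=
  let keys := PySem.List.sorted (lines.map Prod.fst) (fun x => x) false
  let st := functions.foldl (pvBStep keys) (PySem.Dict.empty, 0)
  (st.1.items, st.2)

-- ===== PRECONDITION & SPEC =====
def Spec_clean_functions_py (lines : List (Int × Int)) (functions : List (String × List (String × Int))) (out : (List (String × List (String × Int))) × Int) : Prop := out = clean_functions_py_alt lines functions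
instance (lines : List (Int × Int)) (functions : List (String × List (String × Int))) (out : (List (String × List (String × Int))) × Int) : Decidable (Spec_clean_functions_py lines functions out) := by unfold Spec_clean_functions_py; infer_instance

-- ===== CLAIM (what is proved, stated in full; the proofs are below) =====
def Claim_equal_clean_functions_py : Prop := ∀ (lines : List (Int × Int)) (functions : List (String × List (String × Int))), Dom_clean_functions_py lines functions → Spec_clean_functions_py lines functions (clean_functions_py lines functions)

-- ===== LEMMAS AND PROOFS =====

-- invariant of the bisect loop: result r keeps keys[<r] < x and x <= keys[>=r] (within [lo,hi))
lemma pvBisect_spec (keys : List Int) (x : Int)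
    (mono : ∀ j k : Nat, j ≤ k → k < keys.length → keys.getD j 0 ≤ keys.getD k 0) :
    ∀ lo hi : Nat, lo ≤ hi → hi ≤ keys.length →
      (∀ j : Nat, j < lo → keys.getD j 0 < x) →
      (∀ j : Nat, hi ≤ j → j < keys.length → x ≤ keys.getD j 0) →
      (∀ j : Nat, j < pvBisect keys x lo hi → keys.getD j 0 < x) ∧
      (∀ j : Nat, pvBisect keys x lo hi ≤ j → j < keys.length → x ≤ keys.getD j 0) ∧
      pvBisect keys x lo hi ≤ keys.length := by
  intro lo hi
  fun_induction pvBisect keys x lo hi with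
  | case1 lo hi h mid hlt ih =>
    intro hle hhi Hlo Hhi
    have hmid : mid = (lo + hi) / 2 := rfl
    refine ih (by omega) hhi ?_ Hhi
    intro j hj
    rcases lt_or_ge j lo with h' | h'
    · exact Hlo j h'
    · exact lt_of_le_of_lt (mono j mid (by omega) (by omega)) hlt
  | case2 lo hi h mid hge ih =>
    intro hle hhi Hlo Hhi
    have hmid : mid = (lo + hi) / 2 := rfl
    refine ih (by omega) (by omega) Hlo ?_
    intro j hj hjlen
    exact le_trans (not_lt.mp hge) (mono mid j hj hjlen)
  | case3 lo hi h =>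
    intro hle hhi Hlo Hhi
    exact ⟨Hlo, fun j hj hjl => Hhi j (by omega) hjl, by omega⟩

lemma pvKeys_mono (lines : List (Int × Int)) :
    ∀ j k : Nat, j ≤ k → k < (PySem.List.sorted (lines.map Prod.fst) (fun x => x) false).length →
      (PySem.List.sorted (lines.map Prod.fst) (fun x => x) false).getD j 0 ≤
      (PySem.List.sorted (lines.map Prod.fst) (fun x => x) false).getD k 0 := by
  intro j k hjk hk
  have hp := PySem.List.sorted_pairwise (lines.map Prod.fst) (fun x => x)
  rw [List.pairwise_iff_getElem] at hp
  rcases eq_or_lt_of_le hjk with rfl | hlt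
  · exact le_refl _
  · rw [List.getD_eq_getElem _ _ (by omega), List.getD_eq_getElem _ _ hk]
    exact hp j k (by omega) hk hlt

lemma pvCheck_eq (lines : List (Int × Int)) (s e : Int) :
    ((decide (pvBisect (PySem.List.sorted (lines.map Prod.fst) (fun x => x) false) s 0
        (PySem.List.sorted (lines.map Prod.fst) (fun x => x) false).length <
        (PySem.List.sorted (lines.map Prod.fst) (fun x => x) false).length)) &&
     (decide ((PySem.List.sorted (lines.map Prod.fst) (fun x => x) false).getD
        (pvBisect (PySem.List.sorted (lines.map Prod.fst) (fun x => x) false) s 0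
          (PySem.List.sorted (lines.map Prod.fst) (fun x => x) false).length) 0 ≤ e)))
    = ((PySem.List.pyRange s (e + 1) 1).any (fun line => lines.any (fun p => p.1 == line))) := by
  set keys := PySem.List.sorted (lines.map Prod.fst) (fun x => x) false with hkeys
  obtain ⟨P1, P2, P3⟩ := pvBisect_spec keys s (pvKeys_mono lines) 0 keys.length
    (Nat.zero_le _) (le_refl _) (by omega) (by omega)
  set r := pvBisect keys s 0 keys.length with hr
  rw [Bool.eq_iff_iff]
  simp only [Bool.and_eq_true, decide_eq_true_eq, List.any_eq_true, PySem.List.mem_pyRange_one,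
    beq_iff_eq]
  constructor
  · rintro ⟨hlt, hle⟩
    have hmem : keys.getD r 0 ∈ keys := by
      rw [List.getD_eq_getElem _ _ hlt]; exact List.getElem_mem hlt
    rw [hkeys, PySem.List.mem_sorted, List.mem_map] at hmem
    obtain ⟨p, hp, hpe⟩ := hmem
    exact ⟨keys.getD r 0, ⟨P2 r (le_refl _) hlt, by omega⟩, p, hp, hpe⟩
  · rintro ⟨line, ⟨hs, hlt⟩, p, hp, hpe⟩
    have hmem : line ∈ keys := by
      rw [hkeys, PySem.List.mem_sorted, List.mem_map]; exact ⟨p, hp, hpe⟩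
    obtain ⟨j, hj, hje⟩ := List.mem_iff_getElem.mp hmem
    have hjr : r ≤ j := by
      by_contra hc
      have := P1 j (by omega)
      rw [List.getD_eq_getElem _ _ hj, hje] at this
      omega
    refine ⟨by omega, ?_⟩
    have := pvKeys_mono lines r j hjr hj
    rw [← hkeys] at this
    rw [List.getD_eq_getElem _ _ hj, hje] at this
    omega

lemma pvStep_eq (lines : List (Int × Int)) (st : PySem.Dict String (List (String × Int)) × Int)
    (kv : String × List (String × Int)) :
    pvAStep lines st kv = pvBStep (PySem.List.sorted (lines.map Prod.fst) (fun x => x) false) st kv := by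
  unfold pvAStep pvBStep
  simp only [List.map_nil, pvCheck_eq, PySem.Set.ofList, PySem.Set.contains, PySem.Set.empty,
    List.foldl_nil, List.contains_nil, Bool.not_false, Bool.and_true, Bool.not_not]

-- ===== VERDICT (by name: the statement is the Claim_ definition above) =====
theorem clean_functions_py_spec : Claim_equal_clean_functions_py := by
  intro lines functions _
  unfold Spec_clean_functions_py clean_functions_py clean_functions_py_alt
  have h : ∀ (fns : List (String × List (String × Int))) (st : PySem.Dict String (List (String × Int)) × Int),
      fns.foldl (pvAStep lines) st = fns.foldl (pvBStep (PySem.List.sorted (lines.map Prod.fst) (fun x => x) false)) st := by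
    intro fns
    induction fns with
    | nil => intro st; rfl
    | cons kv rest ih => intro st; simp only [List.foldl_cons, pvStep_eq, ih]
  simp only [h]
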